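-- pv_equiv track=rewrite | github.com/pypi-data/pypi-mirror-401 | packages/pytest-dsl/pytest_dsl-0.20.0.tar.gz/pytest_dsl-0.20.0/pytest_dsl/core/variable_utils.py | _tokenize_path
-- ===== SOURCE A (Python) =====
-- def _tokenize_path(var_ref: str) -> list:
--     """将变量路径分解为访问令牌
--
--     例如：
--     - "users[0].name" -> ["users", "[0]", "name"]
--     - "data['key'].items[1]" -> ["data", "['key']", "items", "[1]"]
--
--     Args:
--         var_ref: 变量引用路径
--
--     Returns:
--         访问令牌列表
--     """
--     tokens = []
--     current_token = ""
--     i = 0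
--
--     while i < len(var_ref):
--         char = var_ref[i]
--
--         if char == '.':
--             if current_token:
--                 tokens.append(current_token)
--                 current_token = ""
--         elif char == '[':
--             if current_token:
--                 tokens.append(current_token)
--                 current_token = ""
--
--             # 找到匹配的右括号
--             bracket_count = 1
--             bracket_content = "["
--             i += 1
--
--             while i < len(var_ref) and bracket_count > 0:
--                 char = var_ref[i]
--                 bracket_content += char
--                 if char == '[':
--                     bracket_count += 1
--                 elif char == ']':
--                     bracket_count -= 1
--                 i += 1
--
--             tokens.append(bracket_content)
--             i -= 1  # 回退一位，因为外层循环会自增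
--         else:
--             current_token += char
--
--         i += 1
--
--     if current_token:
--         tokens.append(current_token)
--
--     return tokens
-- ===== SOURCE B (Python) =====
-- def _tokenize_path(var_ref: str) -> list:
--     """Flat single-pass state machine with an explicit bracket depth counter."""
--     tokens = []
--     ident = ""
--     buf = ""
--     depth = 0
--     for ch in var_ref:
--         if depth == 0:
--             if ch == '.':
--                 if ident:
--                     tokens.append(ident)
--                     ident = ""
--             elif ch == '[':
--                 if ident:
--                     tokens.append(ident)
--                     ident = ""
--                 buf = "["
--                 depth = 1
--             else:
--                 ident += ch
--         else:
--             buf += ch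
--             if ch == '[':
--                 depth += 1
--             elif ch == ']':
--                 depth -= 1
--                 if depth == 0:
--                     tokens.append(buf)
--                     buf = ""
--     if depth > 0:
--         tokens.append(buf)
--     elif ident:
--         tokens.append(ident)
--     return tokens
-- ===== Notes on version B (the rewrite author's own statement) =====
-- stated objective: alternative
-- what changed: Replaces A's nested index-driven loops (an outer while with an inner bracket-consuming while and manual index rewinding) by a single flat fold over the characters with an explicit bracket-depth counter and a bracket buffer.
import Mathlib
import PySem

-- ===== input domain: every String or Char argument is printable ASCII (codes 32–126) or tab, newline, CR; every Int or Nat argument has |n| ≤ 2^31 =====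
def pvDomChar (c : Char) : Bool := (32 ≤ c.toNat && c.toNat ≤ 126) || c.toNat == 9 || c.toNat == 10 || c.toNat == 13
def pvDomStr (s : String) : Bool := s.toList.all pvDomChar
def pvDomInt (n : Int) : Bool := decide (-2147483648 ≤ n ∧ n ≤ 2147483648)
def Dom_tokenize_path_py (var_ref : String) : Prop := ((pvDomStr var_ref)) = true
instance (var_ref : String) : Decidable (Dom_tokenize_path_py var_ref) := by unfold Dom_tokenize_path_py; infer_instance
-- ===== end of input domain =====

-- B replaces A's nested bracket-consuming inner loop by one flat fold with an explicit depth counter (objective: simpler decomposition, same O(n) cost).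

-- ===== PORT A =====
-- inner while loop of A: consumes chars while bracket_count > 0, returns (bracket_content, rest)
def pvInnerA : List Char → Nat → List Char → List Char × List Char
  | [], _, content => (content, [])
  | c :: rest, count, content =>
    if count = 0 then (content, c :: rest)
    else pvInnerA rest (if c = '[' then count + 1 else if c = ']' then count - 1 else count)
           (content ++ [c])

theorem pvInnerA_len : ∀ (s : List Char) (count : Nat) (content : List Char),
    (pvInnerA s count content).2.length ≤ s.length := by
  intro s
  induction s with
  | nil => intro count content; simp [pvInnerA]
  | cons c rest ih =>
    intro count content
    by_cases h : count = 0
    · simp [pvInnerA, h]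
    · simp only [pvInnerA, if_neg h]
      exact Nat.le_trans (ih _ _) (Nat.le_succ _)

-- outer while loop of A
def pvOuterA : List Char → List String → List Char → List String
  | [], tokens, cur => if cur ≠ [] then tokens ++ [String.ofList cur] else tokens
  | c :: rest, tokens, cur =>
    if c = '.' then
      pvOuterA rest (if cur ≠ [] then tokens ++ [String.ofList cur] else tokens) []
    else if c = '[' then
      let p := pvInnerA rest 1 ['[']
      pvOuterA p.2 ((if cur ≠ [] then tokens ++ [String.ofList cur] else tokens) ++ [String.ofList p.1]) []
    else
      pvOuterA rest tokens (cur ++ [c])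
termination_by s _ _ => s.length
decreasing_by
  all_goals simp only [List.length_cons]
  all_goals first
    | omega
    | exact Nat.lt_succ_of_le (pvInnerA_len _ _ _)

def tokenize_path_py (var_ref : String) : List String :=
  pvOuterA var_ref.toList [] []

-- ===== PORT B =====
-- one step of B's flat state machine: state = (tokens, ident, buf, depth)
def pvStepB (st : List String × List Char × List Char × Nat) (c : Char) :
    List String × List Char × List Char × Nat :=
  match st with
  | (tokens, ident, buf, depth) =>
    if depth = 0 then
      if c = '.' then
        ((if ident ≠ [] then tokens ++ [String.ofList ident] else tokens), [], buf, 0)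
      else if c = '[' then
        ((if ident ≠ [] then tokens ++ [String.ofList ident] else tokens), [], ['['], 1)
      else
        (tokens, ident ++ [c], buf, 0)
    else
      let buf' := buf ++ [c]
      if c = '[' then (tokens, ident, buf', depth + 1)
      else if c = ']' then
        let depth' := depth - 1
        if depth' = 0 then (tokens ++ [String.ofList buf'], ident, [], 0)
        else (tokens, ident, buf', depth')
      else (tokens, ident, buf', depth)

-- B's post-loop flush
def pvFinB (st : List String × List Char × List Char × Nat) : List String :=
  match st with
  | (tokens, ident, buf, depth) =>
    if depth > 0 then tokens ++ [String.ofList buf]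
    else if ident ≠ [] then tokens ++ [String.ofList ident]
    else tokens

def tokenize_path_py_alt (var_ref : String) : List String :=
  pvFinB (var_ref.toList.foldl pvStepB ([], [], [], 0))

-- ===== PRECONDITION & SPEC =====
def Spec_tokenize_path_py (var_ref : String) (out : List String) : Prop := out = tokenize_path_py_alt var_ref
instance (var_ref : String) (out : List String) : Decidable (Spec_tokenize_path_py var_ref out) := by unfold Spec_tokenize_path_py; infer_instance

-- ===== CLAIM (what is proved, stated in full; the proofs are below) =====
def Claim_equal_tokenize_path_py : Prop := ∀ (var_ref : String), Dom_tokenize_path_py var_ref → Spec_tokenize_path_py var_ref (tokenize_path_py var_ref)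

-- ===== LEMMAS AND PROOFS =====

theorem pvInnerA_zero (s : List Char) (content : List Char) :
    pvInnerA s 0 content = (content, s) := by
  cases s <;> simp [pvInnerA]

-- joint loop invariant: B's fold at depth 0 computes A's outer loop; at depth d > 0 it
-- computes A's inner bracket loop and then the outer loop on what remains.
theorem pv_main : ∀ (n : Nat) (s : List Char), s.length ≤ n →
    ((∀ tokens cur buf0,
        pvFinB (s.foldl pvStepB (tokens, cur, buf0, 0)) = pvOuterA s tokens cur) ∧
     (∀ tokens buf d, 0 < d →
        pvFinB (s.foldl pvStepB (tokens, [], buf, d)) =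
          pvOuterA (pvInnerA s d buf).2 (tokens ++ [String.ofList (pvInnerA s d buf).1]) [])) := by
  intro n
  induction n with
  | zero =>
    intro s hs
    cases s with
    | nil =>
      constructor
      · intro tokens cur buf0; simp [pvFinB, pvOuterA]
      · intro tokens buf d hd; simp [pvFinB, pvInnerA, pvOuterA, hd]
    | cons c rest => simp at hs
  | succ n ih =>
    intro s hs
    cases s with
    | nil =>
      constructor
      · intro tokens cur buf0; simp [pvFinB, pvOuterA]
      · intro tokens buf d hd; simp [pvFinB, pvInnerA, pvOuterA, hd]
    | cons c rest =>
      have hr : rest.length ≤ n := by simp at hs; omega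
      constructor
      · intro tokens cur buf0
        by_cases hdot : c = '.'
        · subst hdot
          rw [List.foldl_cons,
            show pvStepB (tokens, cur, buf0, 0) '.' =
              ((if cur ≠ [] then tokens ++ [String.ofList cur] else tokens), [], buf0, 0) from by
                simp [pvStepB],
            (ih rest hr).1]
          simp [pvOuterA]
        · by_cases hbr : c = '['
          · subst hbr
            rw [List.foldl_cons,
              show pvStepB (tokens, cur, buf0, 0) '[' =
                ((if cur ≠ [] then tokens ++ [String.ofList cur] else tokens), [], ['['], 1) from by
                  simp [pvStepB],
              (ih rest hr).2 _ ['['] 1 (by omega)]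
            simp [pvOuterA]
          · rw [List.foldl_cons,
              show pvStepB (tokens, cur, buf0, 0) c = (tokens, cur ++ [c], buf0, 0) from by
                simp [pvStepB, hdot, hbr],
              (ih rest hr).1]
            simp [pvOuterA, hdot, hbr]
      · intro tokens buf d hd
        have hd0 : d ≠ 0 := by omega
        by_cases hbr : c = '['
        · subst hbr
          rw [List.foldl_cons,
            show pvStepB (tokens, [], buf, d) '[' = (tokens, [], buf ++ ['['], d + 1) from by
              simp [pvStepB, hd0],
            (ih rest hr).2 _ _ (d + 1) (by omega)]
          have hti : pvInnerA ('[' :: rest) d buf = pvInnerA rest (d + 1) (buf ++ ['[']) := by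
            simp [pvInnerA, hd0]
          simp [hti]
        · by_cases hcl : c = ']'
          · subst hcl
            by_cases hone : d = 1
            · subst hone
              rw [List.foldl_cons,
                show pvStepB (tokens, [], buf, 1) ']' =
                  (tokens ++ [String.ofList (buf ++ [']'])], [], [], 0) from by simp [pvStepB],
                (ih rest hr).1]
              have hti : pvInnerA (']' :: rest) 1 buf = (buf ++ [']'], rest) := by
                simp [pvInnerA, pvInnerA_zero]
              simp [hti]
            · have hd1 : d - 1 ≠ 0 := by omega
              rw [List.foldl_cons,
                show pvStepB (tokens, [], buf, d) ']' = (tokens, [], buf ++ [']'], d - 1) from by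
                  simp [pvStepB, hd0, hd1],
                (ih rest hr).2 _ _ (d - 1) (by omega)]
              have hti : pvInnerA (']' :: rest) d buf = pvInnerA rest (d - 1) (buf ++ [']']) := by
                simp [pvInnerA, hd0]
              simp [hti]
          · rw [List.foldl_cons,
              show pvStepB (tokens, [], buf, d) c = (tokens, [], buf ++ [c], d) from by
                simp [pvStepB, hd0, hbr, hcl],
              (ih rest hr).2 _ _ d hd]
            have hti : pvInnerA (c :: rest) d buf = pvInnerA rest d (buf ++ [c]) := by
              simp [pvInnerA, hd0, hbr, hcl]
            simp [hti]

-- ===== VERDICT (by name: the statement is the Claim_ definition above) =====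
theorem tokenize_path_py_spec : Claim_equal_tokenize_path_py := by
  intro var_ref _
  unfold Spec_tokenize_path_py tokenize_path_py tokenize_path_py_alt
  exact ((pv_main var_ref.toList.length var_ref.toList le_rfl).1 [] [] []).symm
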